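-- pv_equiv track=rewrite | github.com/sturner11/Roman-Decimal-Converter | Converter.py | decimalize
-- ===== SOURCE A (Python) =====
-- def decimalize(numeral, numerals):
--     """
--     :param numeral: Roman Numeral to convert
--     :param numerals: Roman Numeral Value Dictionary
--     :return:  Dictionary with Roman Numeral mapped to tuple of ("MMM", "C")
--     """
--     num_set = {} #Dictionary with roman numeral mapped to number of numerals and the subtrative
--     num_left = numeral
--     for roman_num in numerals: # For each Roman Numeral
--         decimal_place = ""
--         subtractive = ""
--         while roman_num in num_left: # Grab all the numerals of the type
--             if num_left[0] == roman_num: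
--                 decimal_place += num_left[0] #Group all the number together
--             else:
--                 subtractive += num_left[0] #Keep the subtractive by itself
--             num_left = num_left[1:]
--         if decimal_place != "":
--             num_set[roman_num] = (decimal_place, subtractive)
--     return num_set
-- ===== SOURCE B (Python) =====
-- def decimalize(numeral, numerals):
--     num_set = {}
--     num_left = numeral
--     for roman_num in numerals:
--         cut = num_left.rfind(roman_num)
--         if cut == -1:
--             continue
--         prefix, num_left = num_left[:cut + 1], num_left[cut + 1:]
--         decimal_place = ''.join(c for c in prefix if c == roman_num)
--         if decimal_place:
--             num_set[roman_num] = (decimal_place,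
--                                   ''.join(c for c in prefix if c != roman_num))
--     return num_set
-- ===== Notes on version B (the rewrite author's own statement) =====
-- stated objective: faster
-- what changed: B replaces A's char-by-char `while key in num_left` consumption (a substring scan plus a string slice per consumed character, quadratic) by one rfind of the key's last occurrence, a single cut there, and two filter passes splitting the consumed prefix into matching and non-matching characters.
import Mathlib
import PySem

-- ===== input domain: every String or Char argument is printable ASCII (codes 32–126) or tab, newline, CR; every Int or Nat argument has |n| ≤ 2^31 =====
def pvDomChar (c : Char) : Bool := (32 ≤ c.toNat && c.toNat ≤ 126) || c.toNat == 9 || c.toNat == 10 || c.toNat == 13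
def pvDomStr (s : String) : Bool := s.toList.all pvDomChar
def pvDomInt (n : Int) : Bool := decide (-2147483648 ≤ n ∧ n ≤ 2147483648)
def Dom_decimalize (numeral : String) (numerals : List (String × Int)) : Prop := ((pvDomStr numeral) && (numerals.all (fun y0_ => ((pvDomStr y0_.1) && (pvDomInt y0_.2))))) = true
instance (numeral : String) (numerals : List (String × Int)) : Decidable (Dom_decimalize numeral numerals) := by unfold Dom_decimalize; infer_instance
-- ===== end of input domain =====

-- B replaces A's char-by-char `while key in num_left` consumption by one rfind of the key's
-- last occurrence plus take/drop/filter on the consumed prefix (objective: simpler).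

-- ===== PORT A =====
-- the inner `while roman_num in num_left` loop of A: consume the first char of num_left,
-- appending it to decimal_place if it equals the key (as a 1-char string) else to subtractive
def pvAWhile (key : List Char) (numLeft dec sub : List Char) :
    List Char × List Char × List Char :=
  if PySem.Chars.isIn key numLeft then
    match numLeft with
    | [] => ([], dec, sub)  -- Python raises IndexError here (only reachable for key = ""); excluded by Pre_
    | c :: rest =>
      if [c] = key then pvAWhile key rest (dec ++ [c]) sub
      else pvAWhile key rest dec (sub ++ [c])
  else (numLeft, dec, sub)

-- one iteration of A's `for roman_num in numerals` loop over the state (num_set, num_left)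
def pvStepA (st : List (String × String × String) × List Char) (key : String) :
    List (String × String × String) × List Char :=
  let r := pvAWhile key.toList st.2 [] []
  (if r.2.1 ≠ [] then st.1 ++ [(key, String.ofList r.2.1, String.ofList r.2.2)] else st.1, r.1)

def decimalize (numeral : String) (numerals : List (String × Int)) : List (String × String × String) :=
  -- `for roman_num in numerals`: iteration over the dict's keys (insertion order, deduplicated);
  -- keys are distinct, so dict insertion `num_set[roman_num] = …` is a plain append
  ((PySem.List.dedup (numerals.map Prod.fst)).foldl pvStepA ([], numeral.toList)).1

-- ===== PORT B =====
-- num_left.rfind(roman_num): index of the LAST occurrence of key as a substring, none = -1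
-- (hand port, exact: Python str.rfind has no PySem primitive)
def pvLastOcc (key : List Char) : List Char → Option Nat
  | [] => if key = [] then some 0 else none
  | c :: rest =>
    match pvLastOcc key rest with
    | some j => some (j + 1)
    | none => if key.isPrefixOf (c :: rest) then some 0 else none

-- one iteration of B: rfind the key's last occurrence, cut there, filter the prefix
def pvStepB (st : List (String × String × String) × List Char) (key : String) :
    List (String × String × String) × List Char :=
  match pvLastOcc key.toList st.2 with
  | none => st
  | some j =>
    let pre := st.2.take (j + 1)
    let dec := pre.filter (fun c => [c] = key.toList)
    if dec ≠ [] then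
      (st.1 ++ [(key, String.ofList dec, String.ofList (pre.filter (fun c => ¬ [c] = key.toList)))],
       st.2.drop (j + 1))
    else (st.1, st.2.drop (j + 1))

def decimalize_alt (numeral : String) (numerals : List (String × Int)) : List (String × String × String) :=
  ((PySem.List.dedup (numerals.map Prod.fst)).foldl pvStepB ([], numeral.toList)).1

-- ===== PRECONDITION & SPEC =====
-- Pre_ excludes only dicts containing the empty-string key, on which A raises IndexError.
def Pre_decimalize (numeral : String) (numerals : List (String × Int)) : Prop :=
  ∀ p ∈ numerals, p.1 ≠ ""
instance (numeral : String) (numerals : List (String × Int)) : Decidable (Pre_decimalize numeral numerals) := by unfold Pre_decimalize; infer_instance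

def pvWitness_decimalize : String × (List (String × Int)) :=
  ("MCMXCIV", [("M", 1000), ("C", 100), ("X", 10), ("V", 5), ("I", 1)])

def Spec_decimalize (numeral : String) (numerals : List (String × Int)) (out : List (String × String × String)) : Prop := out = decimalize_alt numeral numerals
instance (numeral : String) (numerals : List (String × Int)) (out : List (String × String × String)) : Decidable (Spec_decimalize numeral numerals out) := by unfold Spec_decimalize; infer_instance

-- ===== CLAIM (what is proved, stated in full; the proofs are below) =====
def Claim_equal_decimalize : Prop := ∀ (numeral : String) (numerals : List (String × Int)), Dom_decimalize numeral numerals → Pre_decimalize numeral numerals → Spec_decimalize numeral numerals (decimalize numeral numerals)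

-- ===== LEMMAS AND PROOFS =====

lemma pvLastOcc_isSome_iff (key : List Char) (s : List Char) :
    (pvLastOcc key s).isSome = true ↔ key <:+: s := by
  induction s with
  | nil =>
    by_cases hk : key = []
    · simp [pvLastOcc, hk]
    · simp [pvLastOcc, hk]
  | cons c rest ih =>
    cases hrest : pvLastOcc key rest with
    | some j =>
      have h1 : pvLastOcc key (c :: rest) = some (j + 1) := by simp [pvLastOcc, hrest]
      have h2 : key <:+: rest := ih.mp (by simp [hrest])
      simp [h1, List.infix_cons_iff.mpr (Or.inr h2)]
    | none =>
      have hni : ¬ key <:+: rest := fun h => by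
        have := ih.mpr h; rw [hrest] at this; simp at this
      by_cases hp : key <+: c :: rest
      · have h1 : pvLastOcc key (c :: rest) = some 0 := by
          simp [pvLastOcc, hrest, List.isPrefixOf_iff_prefix, hp]
        simp [h1, List.infix_cons_iff.mpr (Or.inl hp)]
      · have h1 : pvLastOcc key (c :: rest) = none := by
          simp [pvLastOcc, hrest, List.isPrefixOf_iff_prefix, hp]
        simp only [h1, Option.isSome_none, Bool.false_eq_true, false_iff]
        intro hcontra
        rcases List.infix_cons_iff.mp hcontra with h | h
        · exact hp h
        · exact hni h

lemma pvAWhile_eq (key : List Char) (hk : key ≠ []) :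
    ∀ (s dec sub : List Char),
      pvAWhile key s dec sub =
        match pvLastOcc key s with
        | none => (s, dec, sub)
        | some j =>
          (s.drop (j + 1),
           dec ++ (s.take (j + 1)).filter (fun c => [c] = key),
           sub ++ (s.take (j + 1)).filter (fun c => ¬ [c] = key)) := by
  intro s
  induction s with
  | nil =>
    intro dec sub
    have h1 : pvLastOcc key [] = none := by simp [pvLastOcc, hk]
    have h2 : PySem.Chars.isIn key [] = false := by
      by_contra h
      have := (PySem.Chars.isIn_iff_infix key []).mp (by revert h; cases PySem.Chars.isIn key [] <;> simp)
      exact hk (List.eq_nil_of_infix_nil this)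
    simp [pvAWhile, h1, h2]
  | cons c rest ih =>
    intro dec sub
    by_cases hin : key <:+: (c :: rest)
    · have hisin : PySem.Chars.isIn key (c :: rest) = true :=
        (PySem.Chars.isIn_iff_infix key (c :: rest)).mpr hin
      rw [pvAWhile, hisin]
      simp only [if_true]
      cases hro : pvLastOcc key rest with
      | some j =>
        have hcons : pvLastOcc key (c :: rest) = some (j + 1) := by
          simp [pvLastOcc, hro]
        rw [hcons]
        by_cases hc : [c] = key
        · rw [if_pos hc, ih (dec ++ [c]) sub, hro]
          simp [← hc, List.append_assoc]
        · rw [if_neg hc, ih dec (sub ++ [c]), hro]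
          simp [hc, List.append_assoc]
      | none =>
        have hpre : key.isPrefixOf (c :: rest) = true := by
          rcases List.infix_cons_iff.mp hin with hp | hs
          · exact List.isPrefixOf_iff_prefix.mpr hp
          · exact absurd hs (fun h => by
              have := (pvLastOcc_isSome_iff key rest).mpr h; simp [hro] at this)
        have hcons : pvLastOcc key (c :: rest) = some 0 := by
          simp [pvLastOcc, hro, hpre]
        rw [hcons]
        have hnone : ∀ d s', pvAWhile key rest d s' = (rest, d, s') := by
          intro d s'
          have : PySem.Chars.isIn key rest = false := by
            by_contra h
            have hi := (PySem.Chars.isIn_iff_infix key rest).mp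
              (by revert h; cases PySem.Chars.isIn key rest <;> simp)
            have := (pvLastOcc_isSome_iff key rest).mpr hi
            simp [hro] at this
          rw [pvAWhile.eq_def]; simp [this]
        by_cases hc : [c] = key
        · rw [if_pos hc, hnone]
          simp [← hc]
        · rw [if_neg hc, hnone]
          simp [hc]
    · have hisin : PySem.Chars.isIn key (c :: rest) = false := by
        by_contra h
        exact hin ((PySem.Chars.isIn_iff_infix key (c :: rest)).mp
          (by revert h; cases PySem.Chars.isIn key (c :: rest) <;> simp))
      have hcons : pvLastOcc key (c :: rest) = none := by
        cases hlo : pvLastOcc key (c :: rest) with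
        | none => rfl
        | some j =>
          exact absurd ((pvLastOcc_isSome_iff key (c :: rest)).mp (by simp [hlo])) hin
      rw [pvAWhile, hisin, hcons]
      simp

lemma step_eq (key : String) (hk : key ≠ "") (st : List (String × String × String) × List Char) :
    pvStepA st key = pvStepB st key := by
  have hkl : key.toList ≠ [] := fun h => hk (String.toList_eq_nil_iff.mp h)
  simp only [pvStepA, pvStepB]
  rw [pvAWhile_eq key.toList hkl st.2 [] []]
  cases h : pvLastOcc key.toList st.2 with
  | none => rfl
  | some j =>
    simp only [List.nil_append]
    split_ifs <;> rfl

lemma fold_eq (keys : List String) (h : ∀ k ∈ keys, k ≠ "") :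
    ∀ st, keys.foldl pvStepA st = keys.foldl pvStepB st := by
  induction keys with
  | nil => intro st; rfl
  | cons k ks ih =>
    intro st
    rw [List.foldl_cons, List.foldl_cons, step_eq k (h k (by simp)) st]
    exact ih (fun k' hk' => h k' (by simp [hk'])) _

theorem decimalize_eq_alt (numeral : String) (numerals : List (String × Int))
    (hpre : Pre_decimalize numeral numerals) :
    decimalize numeral numerals = decimalize_alt numeral numerals := by
  unfold decimalize decimalize_alt
  have hkeys : ∀ k ∈ PySem.List.dedup (numerals.map Prod.fst), k ≠ "" := by
    intro k hkmem
    have hmem : k ∈ numerals.map Prod.fst := by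
      have hml := PySem.Set.mem_ofList (numerals.map Prod.fst) k
      simpa [PySem.List.dedup, hml] using hkmem
    rcases List.mem_map.mp hmem with ⟨p, hp, rfl⟩
    exact hpre p hp
  rw [fold_eq _ hkeys]

-- ===== VERDICT (by name: the statement is the Claim_ definition above) =====
theorem decimalize_spec : Claim_equal_decimalize := by
  intro numeral numerals _ hpre
  unfold Spec_decimalize
  exact decimalize_eq_alt numeral numerals hpre
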